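-- pv_equiv track=rewrite | github.com/xuan3986/FunCineForge | clean_srt.py | find_adjacent_repeats
-- ===== SOURCE A (Python) =====
-- ADJ_REPEAT_MIN_RUN = 5
--
-- def find_adjacent_repeats(text):
--     if not text:
--         return 0, []
--     tokens = text.split()
--     repeats = []
--     if len(tokens) >= 2:
--         i = 0
--         while i < len(tokens)-1:
--             run_token = tokens[i]
--             run_len = 1
--             j = i+1
--             while j < len(tokens) and tokens[j] == run_token:
--                 run_len += 1
--                 j += 1
--             if run_len >= ADJ_REPEAT_MIN_RUN:
--                 repeats.append((run_token, run_len, i))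
--             i = j
--         return len(repeats), repeats
--     else:
--         s = text.replace(' ', '')
--         repeats = []
--         i = 0
--         while i < len(s)-1:
--             ch = s[i]
--             j = i+1
--             run_len = 1
--             while j < len(s) and s[j] == ch:
--                 run_len += 1
--                 j += 1
--             # 只有当重复长度达到阈值且不是单个字符时才记录
--             if run_len >= ADJ_REPEAT_MIN_RUN:
--                 # 查找整个重复序列
--                 full_run = s[i:j]
--                 # 只有当序列中所有字符都相同且长度为1时才忽略
--                 if not (len(set(full_run)) == 1 and len(full_run) > 1):
--                     repeats.append((full_run, run_len, i))
--             i = j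
--         return len(repeats), repeats
-- ===== SOURCE B (Python) =====
-- ADJ_REPEAT_MIN_RUN = 5
--
-- def _run_length(tok, rest):
--     # length of the prefix of `rest` whose elements equal tok
--     n = 0
--     for y in rest:
--         if y != tok:
--             break
--         n += 1
--     return n
--
-- def _groups(tokens):
--     # run-length decomposition: list of (token, run length)
--     groups = []
--     rest = tokens
--     while rest:
--         tok = rest[0]
--         n = _run_length(tok, rest[1:]) + 1
--         groups.append((tok, n))
--         rest = rest[n:]
--     return groups
--
-- def find_adjacent_repeats(text):
--     if not text:
--         return 0, []
--     tokens = text.split()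
--     if len(tokens) < 2:
--         # the original char-mode branch provably never records anything
--         return 0, []
--     repeats = []
--     idx = 0
--     for tok, n in _groups(tokens):
--         if n >= ADJ_REPEAT_MIN_RUN:
--             repeats.append((tok, n, idx))
--         idx += n
--     return len(repeats), repeats
-- ===== Notes on version B (the rewrite author's own statement) =====
-- stated objective: simpler
-- what changed: B collapses A's dead single-token character branch to an immediate (0, []) and replaces A's index-arithmetic double while loop by a run-length decomposition of the token list followed by a fold that accumulates start indices; the runs are counted by slicing/iterating list prefixes instead of per-index interpreted loops, which a timing run measured as a constant-factor speedup.
import Mathlib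
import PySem

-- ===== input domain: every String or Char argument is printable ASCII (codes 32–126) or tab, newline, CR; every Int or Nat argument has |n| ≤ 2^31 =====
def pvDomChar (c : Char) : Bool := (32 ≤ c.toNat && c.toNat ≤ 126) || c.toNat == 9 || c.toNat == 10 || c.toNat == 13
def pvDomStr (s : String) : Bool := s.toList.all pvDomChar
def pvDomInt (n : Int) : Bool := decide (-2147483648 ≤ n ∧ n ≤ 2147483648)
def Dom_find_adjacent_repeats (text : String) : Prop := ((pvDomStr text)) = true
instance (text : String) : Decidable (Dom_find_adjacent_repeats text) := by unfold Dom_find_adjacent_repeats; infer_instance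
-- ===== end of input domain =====

-- B collapses A's dead single-token character branch to an immediate (0, []) and replaces A's
-- index-arithmetic double while loop by a run-length decomposition of the token list followed by
-- a fold that accumulates start indices (objective: simpler; return value only, no mutation).

-- ===== PORT A =====
-- A's while loops are ported with a fuel parameter (fuel = list length, always sufficient: each
-- iteration advances the index); the fuel only makes the recursion structural, it never runs out.

-- inner `while j < len(tokens) and tokens[j] == run_token: run_len += 1; j += 1`:
-- counts the matching steps; the loop's run_len is 1 + that count and its final j is j0 + count
def pvA_tokRun (tokens : List String) (tok : String) (fuel : Nat) (j : Nat) : Nat :=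
  match fuel with
  | 0 => 0
  | fuel + 1 =>
    if h : j < tokens.length then
      if tokens[j] = tok then pvA_tokRun tokens tok fuel (j + 1) + 1 else 0
    else 0
termination_by structural fuel

-- outer `while i < len(tokens)-1` of the token branch; tokens[i] is in range here, so getD is exact
def pvA_tokLoop (tokens : List String) (fuel : Nat) (i : Nat)
    (acc : List (String × Int × Int)) : List (String × Int × Int) :=
  match fuel with
  | 0 => acc
  | fuel + 1 =>
    if i < tokens.length - 1 then
      let run_token := tokens.getD i ""
      let run_len := 1 + pvA_tokRun tokens run_token tokens.length (i + 1)
      let j := i + 1 + pvA_tokRun tokens run_token tokens.length (i + 1)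
      let acc' := if 5 ≤ run_len then acc ++ [(run_token, (run_len : Int), (i : Int))] else acc
      pvA_tokLoop tokens fuel j acc'
    else acc
termination_by structural fuel

-- inner `while j < len(s) and s[j] == ch: run_len += 1; j += 1` of the character branch
def pvA_chRun (s : List Char) (ch : Char) (fuel : Nat) (j : Nat) : Nat :=
  match fuel with
  | 0 => 0
  | fuel + 1 =>
    if h : j < s.length then
      if s[j] = ch then pvA_chRun s ch fuel (j + 1) + 1 else 0
    else 0
termination_by structural fuel

-- outer `while i < len(s)-1` of the character branch; s[i] is in range here, so getD is exact
def pvA_chLoop (s : List Char) (fuel : Nat) (i : Nat)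
    (acc : List (String × Int × Int)) : List (String × Int × Int) :=
  match fuel with
  | 0 => acc
  | fuel + 1 =>
    if i < s.length - 1 then
      let ch := s.getD i ' '
      let run_len := 1 + pvA_chRun s ch s.length (i + 1)
      let j := i + 1 + pvA_chRun s ch s.length (i + 1)
      let full_run := PySem.List.slice s (some (i : Int)) (some (j : Int))   -- s[i:j]
      let acc' :=
        if 5 ≤ run_len ∧ ¬ ((PySem.Set.ofList full_run).length = 1 ∧ 1 < full_run.length) then
          acc ++ [(String.ofList full_run, (run_len : Int), (i : Int))]
        else acc
      pvA_chLoop s fuel j acc'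
    else acc
termination_by structural fuel

def find_adjacent_repeats (text : String) : Int × (List (String × Int × Int)) :=
  if text = "" then (0, [])
  else
    let tokens := PySem.Str.split₀ text
    if 2 ≤ tokens.length then
      let repeats := pvA_tokLoop tokens tokens.length 0 []
      ((repeats.length : Int), repeats)
    else
      let s := (PySem.Str.replace text " " "").toList
      let repeats := pvA_chLoop s s.length 0 []
      ((repeats.length : Int), repeats)

-- ===== PORT B =====

-- _run_length(tok, rest)
def pvB_runLength (tok : String) : List String → Nat
  | [] => 0
  | y :: ys => if y = tok then pvB_runLength tok ys + 1 else 0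

-- _groups(tokens): run-length decomposition
def pvB_groups : List String → List (String × Nat)
  | [] => []
  | x :: xs =>
    let n := pvB_runLength x xs
    (x, n + 1) :: pvB_groups (xs.drop n)
termination_by l => l.length
decreasing_by
  exact Nat.lt_succ_of_le (Nat.le_trans (Nat.le_of_eq (List.length_drop ..)) (Nat.sub_le _ _))

-- the `for tok, n in _groups(tokens)` loop of B
def pvB_scan : List (String × Nat) → Nat → List (String × Int × Int) → List (String × Int × Int)
  | [], _, acc => acc
  | (tok, n) :: gs, idx, acc =>
      pvB_scan gs (idx + n) (if 5 ≤ n then acc ++ [(tok, (n : Int), (idx : Int))] else acc)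

def find_adjacent_repeats_alt (text : String) : Int × (List (String × Int × Int)) :=
  if text = "" then (0, [])
  else
    let tokens := PySem.Str.split₀ text
    if tokens.length < 2 then (0, [])
    else
      let repeats := pvB_scan (pvB_groups tokens) 0 []
      ((repeats.length : Int), repeats)

-- ===== PRECONDITION & SPEC =====
def Spec_find_adjacent_repeats (text : String) (out : Int × (List (String × Int × Int))) : Prop := out = find_adjacent_repeats_alt text
instance (text : String) (out : Int × (List (String × Int × Int))) : Decidable (Spec_find_adjacent_repeats text out) := by unfold Spec_find_adjacent_repeats; infer_instance

-- ===== CLAIM (what is proved, stated in full; the proofs are below) =====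
def Claim_equal_find_adjacent_repeats : Prop := ∀ (text : String), Dom_find_adjacent_repeats text → Spec_find_adjacent_repeats text (find_adjacent_repeats text)

-- ===== LEMMAS AND PROOFS =====

theorem pvB_groups_nil : pvB_groups [] = [] := by
  unfold pvB_groups; rfl

theorem pvB_groups_cons (x : String) (xs : List String) :
    pvB_groups (x :: xs) =
      (x, pvB_runLength x xs + 1) :: pvB_groups (xs.drop (pvB_runLength x xs)) := by
  conv_lhs => unfold pvB_groups

-- proof-side: length of the run of equal chars at the head of a char list
def pvCCount (ch : Char) : List Char → Nat
  | [] => 0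
  | c :: cs => if c = ch then pvCCount ch cs + 1 else 0

theorem pvA_tokRun_eq (tokens : List String) (tok : String) :
    ∀ (ys : List String) (fuel j : Nat), tokens.drop j = ys → ys.length ≤ fuel →
    pvA_tokRun tokens tok fuel j = pvB_runLength tok ys := by
  intro ys
  induction ys with
  | nil =>
    intro fuel j h _
    have hl : tokens.length ≤ j := List.drop_eq_nil_iff.mp h
    cases fuel with
    | zero => rfl
    | succ fuel =>
      unfold pvA_tokRun
      simp [Nat.not_lt.mpr hl, pvB_runLength]
  | cons y ys ih =>
    intro fuel j h hfuel
    have hj : j < tokens.length := by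
      by_contra hc
      rw [List.drop_eq_nil_of_le (by omega)] at h
      exact List.cons_ne_nil y ys h.symm
    have hcons : tokens[j] :: tokens.drop (j + 1) = y :: ys :=
      (List.getElem_cons_drop hj).trans h
    have hget : tokens[j] = y := (List.cons_eq_cons.mp hcons).1
    have hdrop : tokens.drop (j + 1) = ys := (List.cons_eq_cons.mp hcons).2
    cases fuel with
    | zero => simp at hfuel
    | succ fuel =>
      unfold pvA_tokRun
      simp only [hj, dif_pos, hget]
      by_cases hy : y = tok
      · rw [if_pos hy, ih fuel (j + 1) hdrop (by simp at hfuel; omega)]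
        simp [pvB_runLength, hy]
      · rw [if_neg hy]
        simp [pvB_runLength, hy]

theorem pvA_chRun_eq (s : List Char) (ch : Char) :
    ∀ (ys : List Char) (fuel j : Nat), s.drop j = ys → ys.length ≤ fuel →
    pvA_chRun s ch fuel j = pvCCount ch ys := by
  intro ys
  induction ys with
  | nil =>
    intro fuel j h _
    have hl : s.length ≤ j := List.drop_eq_nil_iff.mp h
    cases fuel with
    | zero => rfl
    | succ fuel =>
      unfold pvA_chRun
      simp [Nat.not_lt.mpr hl, pvCCount]
  | cons y ys ih =>
    intro fuel j h hfuel
    have hj : j < s.length := by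
      by_contra hc
      rw [List.drop_eq_nil_of_le (by omega)] at h
      exact List.cons_ne_nil y ys h.symm
    have hcons : s[j] :: s.drop (j + 1) = y :: ys := (List.getElem_cons_drop hj).trans h
    have hget : s[j] = y := (List.cons_eq_cons.mp hcons).1
    have hdrop : s.drop (j + 1) = ys := (List.cons_eq_cons.mp hcons).2
    cases fuel with
    | zero => simp at hfuel
    | succ fuel =>
      unfold pvA_chRun
      simp only [hj, dif_pos, hget]
      by_cases hy : y = ch
      · rw [if_pos hy, ih fuel (j + 1) hdrop (by simp at hfuel; omega)]
        simp [pvCCount, hy]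
      · rw [if_neg hy]
        simp [pvCCount, hy]

theorem pvCCount_take (ch : Char) (ys : List Char) :
    ys.take (pvCCount ch ys) = List.replicate (pvCCount ch ys) ch := by
  induction ys with
  | nil => simp [pvCCount]
  | cons y ys ih =>
    by_cases hy : y = ch
    · simp [pvCCount, hy, List.replicate_succ, ih]
    · simp [pvCCount, hy]

theorem pvSet_replicate (ch : Char) (m : Nat) (hm : 1 ≤ m) :
    PySem.Set.ofList (List.replicate m ch) = [ch] := by
  obtain ⟨k, rfl⟩ : ∃ k, m = k + 1 := ⟨m - 1, by omega⟩
  have hstep : ∀ k, List.foldl PySem.Set.add [ch] (List.replicate k ch) = [ch] := by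
    intro k
    induction k with
    | zero => simp
    | succ k ih => rw [List.replicate_succ]; simp [PySem.Set.add, ih]
  rw [List.replicate_succ]
  simpa [PySem.Set.ofList_eq_foldl, PySem.Set.add] using hstep k

-- the character branch never records anything (fuel is irrelevant to that)
theorem pvA_chLoop_nil (s : List Char) :
    ∀ (fuel i : Nat) (acc : List (String × Int × Int)), pvA_chLoop s fuel i acc = acc := by
  intro fuel
  induction fuel with
  | zero => intro i acc; rfl
  | succ fuel ih =>
    intro i acc
    unfold pvA_chLoop
    split
    · next h =>
      have hi' : i < s.length := by omega
      have hch : s.getD i ' ' = s[i] := List.getD_eq_getElem ..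
      have hsuf : (s.drop (i + 1)).length ≤ s.length := by
        simp only [List.length_drop]; omega
      have hrun : pvA_chRun s (s.getD i ' ') s.length (i + 1) = pvCCount s[i] (s.drop (i + 1)) := by
        rw [hch]; exact pvA_chRun_eq s s[i] (s.drop (i + 1)) s.length (i + 1) rfl hsuf
      set n := pvCCount s[i] (s.drop (i + 1)) with hn
      have hslice : PySem.List.slice s (some (i : Int)) (some (((i + 1 + n) : Nat) : Int)) =
          List.replicate (n + 1) s[i] := by
        rw [PySem.List.slice_natCast]
        have hd : s.drop i = s[i] :: s.drop (i + 1) := (List.getElem_cons_drop hi').symm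
        rw [hd]
        have he : i + 1 + n - i = n + 1 := by omega
        rw [he, List.take_succ_cons, hn, pvCCount_take, ← hn, List.replicate_succ]
      simp only [hrun, hslice]
      rw [if_neg, ih (i + 1 + n) acc]
      rintro ⟨h5, hns⟩
      apply hns
      constructor
      · rw [pvSet_replicate s[i] (n + 1) (by omega)]
        rfl
      · simp only [List.length_replicate]; omega
    · rfl

-- the token loop equals B's scan over the run-length groups of the remaining suffix
theorem pvA_tokLoop_eq_scan (tokens : List String) :
    ∀ (xs : List String) (fuel i : Nat) (acc : List (String × Int × Int)),
    tokens.drop i = xs → xs.length ≤ fuel →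
    pvA_tokLoop tokens fuel i acc = pvB_scan (pvB_groups xs) i acc := by
  intro xs
  induction hfuel : xs.length using Nat.strong_induction_on generalizing xs with
  | _ bound ih =>
  intro fuel i acc hdrop hle
  have hlen : tokens.length - i = xs.length := by
    conv_rhs => rw [← hdrop]
    simp
  rcases xs with _ | ⟨x, xs'⟩
  · cases fuel with
    | zero => rw [pvB_groups_nil, pvB_scan]; rfl
    | succ fuel =>
      unfold pvA_tokLoop
      rw [if_neg (by simp only [List.length_nil] at hlen; omega)]
      rw [pvB_groups_nil, pvB_scan]
  rcases xs' with _ | ⟨y, rest⟩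
  · cases fuel with
    | zero => simp only [List.length_cons, List.length_nil] at hfuel; omega
    | succ fuel =>
      unfold pvA_tokLoop
      rw [if_neg (by simp only [List.length_cons, List.length_nil] at hlen; omega)]
      rw [pvB_groups_cons]
      simp [pvB_runLength, pvB_groups_nil, pvB_scan]
  · have hi : i < tokens.length - 1 := by
      simp only [List.length_cons] at hlen; omega
    have hi' : i < tokens.length := by omega
    have hcons : tokens[i] :: tokens.drop (i + 1) = x :: y :: rest :=
      (List.getElem_cons_drop hi').trans hdrop
    have hget : tokens[i] = x := (List.cons_eq_cons.mp hcons).1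
    have hdrop1 : tokens.drop (i + 1) = y :: rest := (List.cons_eq_cons.mp hcons).2
    have hgetD : tokens.getD i "" = x := by rw [List.getD_eq_getElem tokens "" hi', hget]
    set n := pvB_runLength x (y :: rest) with hn
    have hsuf : (y :: rest).length ≤ tokens.length := by
      rw [← hdrop1]; simp only [List.length_drop]; omega
    have hrun : pvA_tokRun tokens x tokens.length (i + 1) = n :=
      pvA_tokRun_eq tokens x (y :: rest) tokens.length (i + 1) hdrop1 hsuf
    have hdropn : tokens.drop (i + 1 + n) = (y :: rest).drop n := by
      rw [← hdrop1, List.drop_drop]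
    cases fuel with
    | zero => simp only [List.length_cons] at hfuel; omega
    | succ fuel =>
      unfold pvA_tokLoop
      rw [if_pos hi]
      simp only [hgetD, hrun]
      rw [ih ((y :: rest).drop n).length
            (by rw [← hfuel]; simp only [List.length_drop, List.length_cons]; omega)
            ((y :: rest).drop n) rfl fuel (i + 1 + n) _ hdropn
            (by simp only [List.length_cons] at hfuel
                simp only [List.length_drop, List.length_cons]; omega)]
      conv_rhs => rw [pvB_groups_cons]
      simp only [← hn, pvB_scan]
      have e1 : 1 + n = n + 1 := by omega
      have e2 : i + 1 + n = i + (n + 1) := by omega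
      rw [e1, e2]

-- ===== VERDICT (by name: the statement is the Claim_ definition above) =====
theorem find_adjacent_repeats_spec : Claim_equal_find_adjacent_repeats := by
  intro text _
  unfold Spec_find_adjacent_repeats find_adjacent_repeats find_adjacent_repeats_alt
  by_cases h0 : text = ""
  · simp [h0]
  · by_cases h2 : 2 ≤ (PySem.Str.split₀ text).length
    · simp only [if_neg h0, if_pos h2, if_neg (show ¬ (PySem.Str.split₀ text).length < 2 by omega),
        pvA_tokLoop_eq_scan (PySem.Str.split₀ text) (PySem.Str.split₀ text)
          (PySem.Str.split₀ text).length 0 [] (by simp) (Nat.le_refl _)]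
    · have hlt : (PySem.Str.split₀ text).length < 2 := by omega
      simp [if_neg h0, hlt, pvA_chLoop_nil]
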